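-- pv_equiv track=rewrite | github.com/Eric-Xu/streamlit-hmm-nj-tr-pr-20250203 | utils/party_churn.py | get_borrower_to_lenders
-- ===== SOURCE A (Python) =====
-- from typing import Dict, List, Set, Tuple
--
-- def get_borrower_to_lenders(prepped_data: List[Dict]) -> Dict[str, Set[str]]:
--     """
--     For each borrower (buyerName), return a list of unique lender names they've used.
--     """
--     borrower_to_lenders: Dict[str, set] = {}
--     for record in prepped_data:
--         borrower = record.get("buyerName")
--         lender = record.get("lenderName")
--         if not borrower or not lender:
--             continue
--         if borrower not in borrower_to_lenders:
--             borrower_to_lenders[borrower] = set()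
--         borrower_to_lenders[borrower].add(lender)
--
--     return borrower_to_lenders
-- ===== SOURCE B (Python) =====
-- def get_borrower_to_lenders(prepped_data):
--     """
--     Alternative decomposition: extract the valid (borrower, lender) pairs once,
--     then build the result per distinct borrower with comprehensions.
--     """
--     pairs = [(r.get("buyerName"), r.get("lenderName")) for r in prepped_data]
--     valid = [(b, l) for (b, l) in pairs if b and l]
--     borrowers = list(dict.fromkeys(b for (b, _) in valid))
--     return {b: {l for (b2, l) in valid if b2 == b} for b in borrowers}
-- ===== Notes on version B (the rewrite author's own statement) =====
-- stated objective: alternative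
-- what changed: Replaces the single-pass dict-of-sets accumulation with a filter-then-group strategy: build the list of valid (borrower, lender) pairs, dedup the borrowers, and form each borrower's lender set by a comprehension over the pair list.
import Mathlib
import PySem

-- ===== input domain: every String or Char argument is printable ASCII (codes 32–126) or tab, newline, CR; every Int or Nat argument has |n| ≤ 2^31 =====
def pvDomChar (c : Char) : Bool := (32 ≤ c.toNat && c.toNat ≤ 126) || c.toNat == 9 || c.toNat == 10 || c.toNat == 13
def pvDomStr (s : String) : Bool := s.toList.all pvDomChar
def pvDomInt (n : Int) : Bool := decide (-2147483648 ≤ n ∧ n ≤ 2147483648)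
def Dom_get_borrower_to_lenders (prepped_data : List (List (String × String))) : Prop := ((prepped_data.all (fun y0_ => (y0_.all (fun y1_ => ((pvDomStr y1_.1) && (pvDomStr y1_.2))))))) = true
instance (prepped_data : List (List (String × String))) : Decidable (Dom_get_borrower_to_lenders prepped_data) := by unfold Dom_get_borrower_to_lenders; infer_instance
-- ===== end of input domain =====

-- B replaces A's single-pass dict-of-sets accumulation with filter-the-valid-pairs,
-- dedup-the-borrowers, then per-borrower comprehensions (alternative decomposition, no speed claim).


-- ===== PORT A =====
-- record.get(k) returning None and returning "" are both falsy and only tested for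
-- truthiness before the skip, so the port collapses None to "" with getD "" (exact here).
def get_borrower_to_lenders (prepped_data : List (List (String × String))) : List (String × List String) :=
  (prepped_data.foldl (fun d record =>
      let borrower := ((PySem.Dict.mk record).get? "buyerName").getD ""
      let lender := ((PySem.Dict.mk record).get? "lenderName").getD ""
      if borrower = "" ∨ lender = "" then d
      else
        let d' := if d.contains borrower then d else d.insert borrower ([] : List String)
        d'.modify borrower [] (fun s => PySem.Set.add s lender)
    ) PySem.Dict.empty).items

-- ===== PORT B =====
def get_borrower_to_lenders_alt (prepped_data : List (List (String × String))) : List (String × List String) :=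
  let pairs := prepped_data.map (fun r =>
    (((PySem.Dict.mk r).get? "buyerName").getD "", ((PySem.Dict.mk r).get? "lenderName").getD ""))
  let valid := pairs.filter (fun p => p.1 != "" && p.2 != "")
  let borrowers := PySem.List.dedup (valid.map (·.1))
  borrowers.map (fun b => (b, PySem.Set.ofList ((valid.filter (fun q => q.1 == b)).map (·.2))))

-- ===== PRECONDITION & SPEC =====
def Spec_get_borrower_to_lenders (prepped_data : List (List (String × String))) (out : List (String × List String)) : Prop := out = get_borrower_to_lenders_alt prepped_data
instance (prepped_data : List (List (String × String))) (out : List (String × List String)) : Decidable (Spec_get_borrower_to_lenders prepped_data out) := by unfold Spec_get_borrower_to_lenders; infer_instance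

-- ===== CLAIM (what is proved, stated in full; the proofs are below) =====
def Claim_equal_get_borrower_to_lenders : Prop := ∀ (prepped_data : List (List (String × String))), Dom_get_borrower_to_lenders prepped_data → Spec_get_borrower_to_lenders prepped_data (get_borrower_to_lenders prepped_data)

-- ===== LEMMAS AND PROOFS =====

-- A's loop body on one already-extracted valid pair.
def pvStep (d : PySem.Dict String (List String)) (p : String × String) : PySem.Dict String (List String) :=
  let d' := if d.contains p.1 then d else d.insert p.1 ([] : List String)
  d'.modify p.1 [] (fun s => PySem.Set.add s p.2)

-- B's grouped description of a list of valid pairs.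
def pvGroup (vs : List (String × String)) : List (String × List String) :=
  (PySem.List.dedup (vs.map (·.1))).map
    (fun b => (b, PySem.Set.ofList ((vs.filter (fun q => q.1 == b)).map (·.2))))

lemma pvSet_ofList_append_singleton {α : Type} [BEq α] (xs : List α) (x : α) :
    PySem.Set.ofList (xs ++ [x]) = PySem.Set.add (PySem.Set.ofList xs) x := by
  simp [PySem.Set.ofList, List.foldl_append]

lemma pvSet_add_of_mem {α : Type} [BEq α] [LawfulBEq α] (s : PySem.Set α) (x : α) (h : x ∈ s) :
    PySem.Set.add s x = s := by
  simp [PySem.Set.add, PySem.Set.contains, h]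

lemma pvSet_add_of_not_mem {α : Type} [BEq α] [LawfulBEq α] (s : PySem.Set α) (x : α) (h : x ∉ s) :
    PySem.Set.add s x = s ++ [x] := by
  simp [PySem.Set.add, PySem.Set.contains, h]

-- A's fold over records equals the fold of pvStep over the valid pairs.
lemma pvFold_eq_fold_valid (pd : List (List (String × String))) (d : PySem.Dict String (List String)) :
    pd.foldl (fun d record =>
      let borrower := ((PySem.Dict.mk record).get? "buyerName").getD ""
      let lender := ((PySem.Dict.mk record).get? "lenderName").getD ""
      if borrower = "" ∨ lender = "" then d
      else
        let d' := if d.contains borrower then d else d.insert borrower ([] : List String)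
        d'.modify borrower [] (fun s => PySem.Set.add s lender)) d
    = (((pd.map (fun r =>
        (((PySem.Dict.mk r).get? "buyerName").getD "", ((PySem.Dict.mk r).get? "lenderName").getD ""))).filter
        (fun p => p.1 != "" && p.2 != ""))).foldl pvStep d := by
  induction pd generalizing d with
  | nil => rfl
  | cons r rest ih =>
    simp only [List.map_cons, List.filter_cons, List.foldl_cons]
    by_cases hb : ((PySem.Dict.mk r).get? "buyerName").getD "" = ""
    · simp [hb, ih]
    · by_cases hl : ((PySem.Dict.mk r).get? "lenderName").getD "" = ""
      · simp [hb, hl, ih]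
      · simp [hb, hl, ih, pvStep]

-- main invariant: the dict fold's items are the grouped description.
lemma pvFold_items (vs : List (String × String)) :
    (vs.foldl pvStep PySem.Dict.empty).items = pvGroup vs := by
  induction vs using List.reverseRecOn with
  | nil => simp [pvGroup, PySem.Dict.empty, PySem.List.dedup, PySem.Set.ofList, PySem.Set.empty]
  | append_singleton vs p ih =>
    obtain ⟨b, l⟩ := p
    rw [List.foldl_append, List.foldl_cons, List.foldl_nil]
    have hkeys : (vs.foldl pvStep PySem.Dict.empty).keys = PySem.List.dedup (vs.map (·.1)) := by
      show ((vs.foldl pvStep PySem.Dict.empty).items).map (·.1) = _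
      rw [ih]; unfold pvGroup; rw [List.map_map]; simp [Function.comp_def]
    have hnodup : (vs.foldl pvStep PySem.Dict.empty).keys.Nodup := by
      rw [hkeys, PySem.List.dedup_eq_ofList]; exact PySem.Set.nodup_ofList _
    set D := vs.foldl pvStep PySem.Dict.empty with hD
    by_cases hmem : b ∈ PySem.List.dedup (vs.map (·.1))
    · -- borrower already present: in-place set add
      have hcont : D.contains b = true := by
        rw [PySem.Dict.contains_eq_decide_mem_keys, hkeys]; simpa using hmem
      have hbv : (b, PySem.Set.ofList ((vs.filter (fun q => q.1 == b)).map (·.2))) ∈ D.items := by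
        rw [ih]; exact List.mem_map_of_mem hmem
      have hgetD : D.getD b [] = PySem.Set.ofList ((vs.filter (fun q => q.1 == b)).map (·.2)) :=
        PySem.Dict.getD_of_mem_items D hbv hnodup []
      have hK' : PySem.List.dedup ((vs ++ [(b, l)]).map (·.1)) = PySem.List.dedup (vs.map (·.1)) := by
        rw [List.map_append, PySem.List.dedup_eq_ofList, PySem.List.dedup_eq_ofList]
        show PySem.Set.ofList (vs.map (·.1) ++ [b]) = _
        rw [pvSet_ofList_append_singleton]
        exact pvSet_add_of_mem _ _ (by rwa [PySem.List.dedup_eq_ofList] at hmem)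
      simp only [pvStep, hcont, if_true, PySem.Dict.modify, hgetD]
      rw [PySem.Dict.items_insert_of_contains _ _ hcont, ih]
      unfold pvGroup
      rw [hK', List.map_map]
      apply List.map_congr_left
      intro b' _
      by_cases hbb : b' = b
      · subst hbb
        simp [List.filter_append, pvSet_ofList_append_singleton]
      · have : (b == b') = false := by simp [Ne.symm hbb]
        simp [List.filter_append, hbb, this]
    · -- new borrower: empty set inserted, then the lender added
      have hcont : D.contains b = false := by
        rw [PySem.Dict.contains_eq_decide_mem_keys, hkeys]; simpa using hmem
      have hnotmem : b ∉ vs.map (·.1) := by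
        rwa [PySem.List.mem_dedup] at hmem
      have hfilterb : vs.filter (fun q => q.1 == b) = [] := by
        rw [List.filter_eq_nil_iff]
        intro q hq hqb
        have hq1 : q.1 = b := by simpa using hqb
        exact hnotmem (by rw [← hq1]; exact List.mem_map_of_mem hq)
      have hK' : PySem.List.dedup ((vs ++ [(b, l)]).map (·.1))
          = PySem.List.dedup (vs.map (·.1)) ++ [b] := by
        rw [List.map_append, PySem.List.dedup_eq_ofList, PySem.List.dedup_eq_ofList]
        show PySem.Set.ofList (vs.map (·.1) ++ [b]) = _
        rw [pvSet_ofList_append_singleton]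
        exact pvSet_add_of_not_mem _ _ (by
          rw [PySem.Set.mem_ofList]; exact hnotmem)
      have hadd : PySem.Set.add ([] : List String) l = [l] := by
        simp [PySem.Set.add, PySem.Set.contains]
      simp only [pvStep, hcont, Bool.false_eq_true, if_false, PySem.Dict.modify,
        PySem.Dict.getD_insert_self, hadd, PySem.Dict.insert_insert_self]
      rw [PySem.Dict.items_insert_of_not_contains _ _ hcont, ih]
      unfold pvGroup
      rw [hK', List.map_append]
      congr 1
      · apply List.map_congr_left
        intro b' hb'
        have hbb : b' ≠ b := fun h => hmem (h ▸ hb')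
        have : (b == b') = false := by simp [Ne.symm hbb]
        simp [List.filter_append, this]
      · simp [List.filter_append, hfilterb, PySem.Set.ofList, PySem.Set.add,
          PySem.Set.empty, PySem.Set.contains]

-- ===== VERDICT (by name: the statement is the Claim_ definition above) =====
theorem get_borrower_to_lenders_spec : Claim_equal_get_borrower_to_lenders := by
  intro pd _
  show _ = _
  unfold get_borrower_to_lenders get_borrower_to_lenders_alt
  rw [pvFold_eq_fold_valid, pvFold_items]
  rfl
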